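-- pv_equiv track=rewrite | github.com/yaneurao/Pytra | test/py/case77_loop.py | calc_77
-- ===== SOURCE A (Python) =====
-- def calc_77(values: list[int]) -> int:
--     total: int = 0
--     for v in values:
--         if v % 2 == 0:
--             total = total + v
--         else:
--             total = total + (v * 2)
--     return total
-- ===== SOURCE B (Python) =====
-- def calc_77(values: list[int]) -> int:
--     # sum of all elements, plus the odd elements once more (doubling the odds)
--     return sum(values) + sum(v for v in values if v % 2)
-- ===== Notes on version B (the rewrite author's own statement) =====
-- stated objective: simpler
-- what changed: Replaces the per-element if/else accumulator loop with a closed decomposition: plain sum of all elements plus a second sum over the odd elements, using that doubling an odd value equals adding it once more.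
import Mathlib
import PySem

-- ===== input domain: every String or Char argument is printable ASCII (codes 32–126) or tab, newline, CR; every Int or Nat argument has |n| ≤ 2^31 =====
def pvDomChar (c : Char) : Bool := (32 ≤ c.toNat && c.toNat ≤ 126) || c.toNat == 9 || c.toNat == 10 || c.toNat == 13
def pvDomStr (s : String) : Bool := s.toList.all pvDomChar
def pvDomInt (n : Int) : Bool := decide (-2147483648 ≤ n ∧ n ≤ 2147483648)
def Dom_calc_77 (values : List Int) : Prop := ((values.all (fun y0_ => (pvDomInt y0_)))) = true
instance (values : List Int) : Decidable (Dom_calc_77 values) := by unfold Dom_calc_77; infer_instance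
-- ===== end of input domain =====

-- B replaces A's branching accumulator loop with sum of all elements plus sum of the odd elements (simpler decomposition).

-- ===== PORT A =====
def calc_77 (values : List Int) : Int :=
  values.foldl (fun total v =>
    if PySem.Int.mod v 2 = 0 then total + v else total + (v * 2)) 0

-- ===== PORT B =====
def calc_77_alt (values : List Int) : Int :=
  values.sum + ((values.filter (fun v => PySem.Int.mod v 2 ≠ 0)).sum)

-- ===== PRECONDITION & SPEC =====
def Spec_calc_77 (values : List Int) (out : Int) : Prop := out = calc_77_alt values
instance (values : List Int) (out : Int) : Decidable (Spec_calc_77 values out) := by unfold Spec_calc_77; infer_instance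

-- ===== CLAIM (what is proved, stated in full; the proofs are below) =====
def Claim_equal_calc_77 : Prop := ∀ (values : List Int), Dom_calc_77 values → Spec_calc_77 values (calc_77 values)

-- ===== LEMMAS AND PROOFS =====
theorem calc_77_foldl (values : List Int) (t : Int) :
    values.foldl (fun total v =>
      if PySem.Int.mod v 2 = 0 then total + v else total + (v * 2)) t
    = t + values.sum + ((values.filter (fun v => PySem.Int.mod v 2 ≠ 0)).sum) := by
  induction values generalizing t with
  | nil => simp
  | cons v vs ih =>
    rw [List.foldl_cons, List.filter_cons, ih]
    by_cases h : PySem.Int.mod v 2 = 0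
    · rw [if_pos h, h]
      simp
      ring
    · rw [if_neg h, decide_eq_true h]
      simp
      ring

-- ===== VERDICT (by name: the statement is the Claim_ definition above) =====
theorem calc_77_spec : Claim_equal_calc_77 := by
  intro values _
  unfold Spec_calc_77 calc_77 calc_77_alt
  simpa using calc_77_foldl values 0
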